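-- pv_equiv track=rewrite | github.com/Zanderwohl/ScheduleBoard | timetable.py | filter_after_time
-- ===== SOURCE A (Python) =====
-- def _time_key(row):
--     try:
--         hh, mm = row.get("time", "").split(":")
--         return int(hh) * 60 + int(mm)
--     except Exception:
--         return 24 * 60 + 59  # push malformed to bottom
--
-- def filter_after_time(timetable, minutes_since_midnight):
--     """Return rows whose time >= given minutes, wrapping to start after midnight."""
--     try:
--         def to_minutes(r):
--             return _time_key(r)
--
--         sorted_rows = sorted(timetable, key=to_minutes)
--         after = [r for r in sorted_rows if to_minutes(r) >= minutes_since_midnight]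
--         before = [r for r in sorted_rows if to_minutes(r) < minutes_since_midnight]
--         return after + before
--     except Exception:
--         return timetable
-- ===== SOURCE B (Python) =====
-- def _time_key(row):
--     try:
--         hh, mm = row.get("time", "").split(":")
--         return int(hh) * 60 + int(mm)
--     except Exception:
--         return 24 * 60 + 59  # push malformed to bottom
--
-- def filter_after_time(timetable, minutes_since_midnight):
--     """Return rows whose time >= given minutes, wrapping to start after midnight."""
--     try:
--         return sorted(
--             timetable,
--             key=lambda r: (0 if _time_key(r) >= minutes_since_midnight else 1,
--                            _time_key(r)),
--         )
--     except Exception: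
--         return timetable
-- ===== Notes on version B (the rewrite author's own statement) =====
-- stated objective: simpler
-- what changed: Replaces A's sort followed by two filter passes and a concatenation with a single sorted() call whose compound tuple key (0 if key>=minutes else 1, key) realizes the rotation directly.
import Mathlib
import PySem

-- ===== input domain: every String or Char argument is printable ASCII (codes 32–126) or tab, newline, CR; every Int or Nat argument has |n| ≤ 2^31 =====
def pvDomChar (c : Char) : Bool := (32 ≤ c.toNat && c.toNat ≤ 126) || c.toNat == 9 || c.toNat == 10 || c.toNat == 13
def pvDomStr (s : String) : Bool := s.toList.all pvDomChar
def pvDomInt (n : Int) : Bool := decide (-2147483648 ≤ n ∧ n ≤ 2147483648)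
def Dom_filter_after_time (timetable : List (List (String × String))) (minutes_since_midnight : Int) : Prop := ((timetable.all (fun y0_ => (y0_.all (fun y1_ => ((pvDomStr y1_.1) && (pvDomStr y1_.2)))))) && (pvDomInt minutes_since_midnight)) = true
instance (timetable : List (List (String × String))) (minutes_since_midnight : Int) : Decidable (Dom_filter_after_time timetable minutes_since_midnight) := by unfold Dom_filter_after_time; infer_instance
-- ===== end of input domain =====

-- B rotates with ONE sorted() call on a compound tuple key instead of A's sort + two filter passes + concatenation.
-- Inside the typed domain neither program's try/except can fire (_time_key catches its own exceptions and the
-- comparisons are int-vs-int), so the ports omit it; both are exact there.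

-- ===== PORT A =====
-- _time_key(row): row.get("time","").split(":") must give exactly two int-parsable pieces, else 24*60+59.
def pvTimeKey (row : List (String × String)) : Int :=
  let s := (PySem.Dict.ofList row).getD "time" ""
  match PySem.Str.split? s ":" with
  | some [hh, mm] =>
    match PySem.Int.ofStr? hh, PySem.Int.ofStr? mm with
    | some h, some m => h * 60 + m
    | _, _ => 24 * 60 + 59
  | _ => 24 * 60 + 59

def filter_after_time (timetable : List (List (String × String))) (minutes_since_midnight : Int) : List (List (String × String)) :=
  let sorted_rows := PySem.List.sorted timetable (fun r => pvTimeKey r) false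
  let after := sorted_rows.filter (fun r => decide (minutes_since_midnight ≤ pvTimeKey r))
  let before := sorted_rows.filter (fun r => decide (pvTimeKey r < minutes_since_midnight))
  after ++ before

-- ===== PORT B =====
def filter_after_time_alt (timetable : List (List (String × String))) (minutes_since_midnight : Int) : List (List (String × String)) :=
  PySem.List.sorted2 timetable
    (fun r => if minutes_since_midnight ≤ pvTimeKey r then (0 : Int) else 1)
    (fun r => pvTimeKey r) false

-- ===== PRECONDITION & SPEC =====
def Spec_filter_after_time (timetable : List (List (String × String))) (minutes_since_midnight : Int) (out : List (List (String × String))) : Prop := out = filter_after_time_alt timetable minutes_since_midnight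
instance (timetable : List (List (String × String))) (minutes_since_midnight : Int) (out : List (List (String × String))) : Decidable (Spec_filter_after_time timetable minutes_since_midnight out) := by unfold Spec_filter_after_time; infer_instance

-- ===== CLAIM (what is proved, stated in full; the proofs are below) =====
def Claim_equal_filter_after_time : Prop := ∀ (timetable : List (List (String × String))) (minutes_since_midnight : Int), Dom_filter_after_time timetable minutes_since_midnight → Spec_filter_after_time timetable minutes_since_midnight (filter_after_time timetable minutes_since_midnight)

-- ===== LEMMAS AND PROOFS =====

theorem insertBy_nil {a : Type} (b : a → a → Bool) (x : a) :
    PySem.List.insertBy b x [] = [x] := rfl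

theorem insertBy_cons {a : Type} (b : a → a → Bool) (x y : a) (ys : List a) :
    PySem.List.insertBy b x (y :: ys)
      = if b x y then x :: y :: ys else y :: PySem.List.insertBy b x ys := rfl

-- If x compares the same way against every element of ys under two orders, insertion agrees.
theorem insertBy_congr_mem {a : Type} (b1 b2 : a → a → Bool) (x : a) (ys : List a)
    (h : forall y, y ∈ ys → b1 x y = b2 x y) :
    PySem.List.insertBy b1 x ys = PySem.List.insertBy b2 x ys := by
  induction ys with
  | nil => rfl
  | cons y ys ih =>
    rw [insertBy_cons, insertBy_cons, h y (by simp), ih (fun z hz => h z (by simp [hz]))]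

-- The lexicographic `before` of B's compound key.
def pvLex {a : Type} (k : a → Int) (m : Int) (x y : a) : Bool :=
  decide ((if m ≤ k x then (0 : Int) else 1) < (if m ≤ k y then (0 : Int) else 1)) ||
    (!decide ((if m ≤ k y then (0 : Int) else 1) < (if m ≤ k x then (0 : Int) else 1)) &&
      decide (k x < k y))

theorem insert_lex_ge {a : Type} (k : a → Int) (m : Int) (x : a) (F B : List a)
    (hx : m ≤ k x) (hF : forall y, y ∈ F → m ≤ k y) (hB : forall y, y ∈ B → k y < m) :
    PySem.List.insertBy (pvLex k m) x (F ++ B)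
      = PySem.List.insertBy (fun u v => decide (k u < k v)) x F ++ B := by
  induction F with
  | nil =>
    cases B with
    | nil => rfl
    | cons b B' =>
      have hb := hB b (by simp)
      simp [insertBy_cons, insertBy_nil, pvLex, if_pos hx, if_neg (by omega : ¬ m ≤ k b)]
  | cons y F' ih =>
    have hy := hF y (by simp)
    have hpv : pvLex k m x y = decide (k x < k y) := by
      simp [pvLex, if_pos hx, if_pos hy]
    rw [List.cons_append, insertBy_cons, insertBy_cons, hpv]
    by_cases hlt : k x < k y
    · simp [hlt]
    · simp only [decide_eq_true_eq, if_neg hlt]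
      rw [ih (fun z hz => hF z (by simp [hz]))]
      rfl

theorem insert_lex_lt {a : Type} (k : a → Int) (m : Int) (x : a) (F B : List a)
    (hx : ¬ m ≤ k x) (hF : forall y, y ∈ F → m ≤ k y) :
    PySem.List.insertBy (pvLex k m) x (F ++ B)
      = F ++ PySem.List.insertBy (pvLex k m) x B := by
  induction F with
  | nil => rfl
  | cons y F' ih =>
    have hy := hF y (by simp)
    have hpv : pvLex k m x y = false := by
      simp [pvLex, if_neg hx, if_pos hy]
    rw [List.cons_append, insertBy_cons, hpv]
    have hih := ih (fun z hz => hF z (List.mem_cons_of_mem _ hz))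
    simp only [Bool.false_eq_true, if_false, hih]
    rfl

theorem filter_ge_insert_of_ge {a : Type} (k : a → Int) (m : Int) (x : a) (s : List a)
    (hx : m ≤ k x) :
    (PySem.List.insertBy (fun u v => decide (k u < k v)) x s).filter (fun r => decide (m ≤ k r))
      = PySem.List.insertBy (fun u v => decide (k u < k v)) x (s.filter (fun r => decide (m ≤ k r))) := by
  induction s with
  | nil => simp [insertBy_nil, hx]
  | cons y s' ih =>
    rw [insertBy_cons]
    by_cases hlt : k x < k y
    · have hy : m ≤ k y := by omega
      simp [hlt, hx, hy, insertBy_cons]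
    · simp only [decide_eq_true_eq, if_neg hlt, List.filter_cons]
      by_cases hy : m ≤ k y
      · simp [hy, insertBy_cons, if_neg hlt, ih]
      · simp [hy, ih]

theorem filter_lt_insert_of_ge {a : Type} (k : a → Int) (m : Int) (x : a) (s : List a)
    (hx : m ≤ k x) :
    (PySem.List.insertBy (fun u v => decide (k u < k v)) x s).filter (fun r => decide (k r < m))
      = s.filter (fun r => decide (k r < m)) := by
  induction s with
  | nil => simp [insertBy_nil]; omega
  | cons y s' ih =>
    rw [insertBy_cons]
    by_cases hlt : k x < k y
    · simp [hlt, List.filter_cons, show ¬ k x < m by omega]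
    · simp [hlt, List.filter_cons, ih]

theorem filter_ge_insert_of_lt {a : Type} (k : a → Int) (m : Int) (x : a) (s : List a)
    (hx : ¬ m ≤ k x) :
    (PySem.List.insertBy (fun u v => decide (k u < k v)) x s).filter (fun r => decide (m ≤ k r))
      = s.filter (fun r => decide (m ≤ k r)) := by
  induction s with
  | nil => simp [insertBy_nil, hx]
  | cons y s' ih =>
    rw [insertBy_cons]
    by_cases hlt : k x < k y
    · simp [hlt, List.filter_cons, hx]
    · simp [hlt, List.filter_cons, ih]

theorem filter_lt_insert_of_lt {a : Type} (k : a → Int) (m : Int) (x : a) (s : List a)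
    (hx : ¬ m ≤ k x) (hs : s.Pairwise (fun u v => k u ≤ k v)) :
    (PySem.List.insertBy (fun u v => decide (k u < k v)) x s).filter (fun r => decide (k r < m))
      = PySem.List.insertBy (fun u v => decide (k u < k v)) x (s.filter (fun r => decide (k r < m))) := by
  induction s with
  | nil => simp [insertBy_nil]; omega
  | cons y s' ih =>
    have hpw := (List.pairwise_cons.mp hs).1
    have hs' := (List.pairwise_cons.mp hs).2
    rw [insertBy_cons]
    by_cases hlt : k x < k y
    · by_cases hy : k y < m
      · simp [hlt, hy, show k x < m by omega, insertBy_cons]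
      · -- y and everything after it is >= m, so the filtered tail is empty and x heads it
        have hnone : s'.filter (fun r => decide (k r < m)) = ([] : List a) := by
          apply List.filter_eq_nil_iff.mpr
          intro z hz
          have := hpw z hz
          simp; omega
        simp [hlt, hy, show k x < m by omega, hnone, insertBy_nil]
    · simp only [decide_eq_true_eq, if_neg hlt, List.filter_cons]
      by_cases hy : k y < m
      · simp [hy, insertBy_cons, if_neg hlt, ih hs']
      · simp [hy, ih hs']

-- Main: B's single compound-key sort equals A's sort + partition + concatenation.
theorem sorted2_eq_partition {a : Type} (xs : List a) (k : a → Int) (m : Int) :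
    PySem.List.sorted2 xs (fun r => if m ≤ k r then (0 : Int) else 1) k false
      = (PySem.List.sorted xs k false).filter (fun r => decide (m ≤ k r))
        ++ (PySem.List.sorted xs k false).filter (fun r => decide (k r < m)) := by
  induction xs using List.reverseRecOn with
  | nil => rfl
  | append_singleton xs x ih =>
    have hA : PySem.List.sorted (xs ++ [x]) k false
        = PySem.List.insertBy (fun u v => decide (k u < k v)) x (PySem.List.sorted xs k false) := by
      rw [PySem.List.sorted_eq_foldl_insertBy, PySem.List.sorted_eq_foldl_insertBy,
        List.foldl_concat]
    have hB : PySem.List.sorted2 (xs ++ [x]) (fun r => if m ≤ k r then (0 : Int) else 1) k false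
        = PySem.List.insertBy (pvLex k m) x
            (PySem.List.sorted2 xs (fun r => if m ≤ k r then (0 : Int) else 1) k false) := by
      show List.foldl _ [] (xs ++ [x]) = _
      rw [List.foldl_concat]
      rfl
    set s := PySem.List.sorted xs k false with hsdef
    have hpw : s.Pairwise (fun u v => k u ≤ k v) := PySem.List.sorted_pairwise xs k
    have hF : forall y, y ∈ s.filter (fun r => decide (m ≤ k r)) → m ≤ k y := by
      intro y hy; simpa using (List.of_mem_filter hy)
    have hBm : forall y, y ∈ s.filter (fun r => decide (k r < m)) → k y < m := by
      intro y hy; simpa using (List.of_mem_filter hy)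
    rw [hB, ih, hA]
    by_cases hx : m ≤ k x
    · rw [insert_lex_ge k m x _ _ hx hF hBm,
        filter_ge_insert_of_ge k m x s hx, filter_lt_insert_of_ge k m x s hx]
    · rw [insert_lex_lt k m x _ _ hx hF,
        filter_ge_insert_of_lt k m x s hx, filter_lt_insert_of_lt k m x s hx hpw,
        insertBy_congr_mem (pvLex k m) (fun u v => decide (k u < k v)) x _
          (by intro y hy
              have hym := hBm y hy
              simp [pvLex, if_neg hx, if_neg (by omega : ¬ m ≤ k y)])]

-- ===== VERDICT (by name: the statement is the Claim_ definition above) =====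
theorem filter_after_time_spec : Claim_equal_filter_after_time := by
  intro timetable m _
  show filter_after_time timetable m = filter_after_time_alt timetable m
  unfold filter_after_time filter_after_time_alt
  exact (sorted2_eq_partition timetable (fun r => pvTimeKey r) m).symm
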